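-- pv_equiv track=rewrite | github.com/muoten/chromaprint2vec | src/harmony_utils.py | most_repeated_pattern
-- ===== SOURCE A (Python) =====
-- from collections import Counter
--
-- def most_repeated_pattern(sequence, pattern_length):
--     patterns = [
--         tuple(sequence[i:i+pattern_length])
--         for i in range(len(sequence) - pattern_length + 1)
--     ]
--
--     pattern_counts = Counter(patterns)
--     # Exclude patterns with fewer than 3 unique chords
--     filtered_patterns = {
--         pattern: count
--         for pattern, count in pattern_counts.items()
--         if len(set(pattern)) >= 3
--     }
--     most_common = Counter(filtered_patterns).most_common(1)
--     return most_common[0] if most_common else None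
-- ===== SOURCE B (Python) =====
-- def most_repeated_pattern(sequence, pattern_length):
--     # Brute-force, dictionary-free: scan the windows; at the FIRST occurrence of
--     # each qualifying window (>= 3 distinct elements) count its repetitions with
--     # list.count and keep a strict running best (ties keep the earliest window).
--     windows = [tuple(sequence[i:i+pattern_length])
--                for i in range(len(sequence) - pattern_length + 1)]
--     best = None
--     for i, w in enumerate(windows):
--         if len(set(w)) >= 3 and w not in windows[:i]:
--             c = windows.count(w)
--             if best is None or c > best[1]:
--                 best = (w, c)
--     return best
-- ===== Notes on version B (the rewrite author's own statement) =====
-- stated objective: alternative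
-- what changed: B drops the Counter/dict machinery entirely: it scans the window list once and, at the first occurrence of each window with >=3 distinct elements, counts its repetitions by a direct list.count scan, keeping a strict running best (ties keep the earliest window) - nested scans over the raw window list instead of A's hash-count + filtered dict + most_common(1).
import Mathlib
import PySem

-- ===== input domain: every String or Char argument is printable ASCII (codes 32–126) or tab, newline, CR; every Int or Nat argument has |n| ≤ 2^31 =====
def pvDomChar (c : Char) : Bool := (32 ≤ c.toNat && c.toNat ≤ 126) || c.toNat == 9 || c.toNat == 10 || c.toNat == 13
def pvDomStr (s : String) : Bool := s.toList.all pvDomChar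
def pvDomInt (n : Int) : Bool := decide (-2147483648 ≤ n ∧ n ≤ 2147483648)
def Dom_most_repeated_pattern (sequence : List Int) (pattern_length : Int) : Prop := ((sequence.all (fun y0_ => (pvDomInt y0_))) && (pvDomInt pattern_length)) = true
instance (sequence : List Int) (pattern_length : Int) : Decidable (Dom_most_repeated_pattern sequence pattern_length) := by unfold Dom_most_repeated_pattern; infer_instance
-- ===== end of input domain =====

-- B is a dictionary-free brute force: first-occurrence scan over the window list with a
-- direct list.count at each new qualifying window (objective: alternative; same return value).

-- ===== PORT A =====
def most_repeated_pattern (sequence : List Int) (pattern_length : Int) : Option (List Int × Int) :=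
  let patterns : List (List Int) :=
    (PySem.List.pyRange 0 (PySem.List.len sequence - pattern_length + 1) 1).map
      (fun i => PySem.List.slice sequence (some i) (some (i + pattern_length)))
  let pattern_counts : PySem.Dict (List Int) Int := PySem.Dict.counter patterns
  let filtered_patterns : PySem.Dict (List Int) Int :=
    pattern_counts.items.foldl
      (fun d p => if 3 ≤ PySem.Set.len (PySem.Set.ofList p.1) then d.insert p.1 p.2 else d)
      PySem.Dict.empty
  -- Counter(filtered_patterns) has the same items in the same order as filtered_patterns
  let most_common := (PySem.List.sorted filtered_patterns.items (fun p => p.2) true).take 1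
  most_common.head?  -- 'most_common[0] if most_common else None'

-- ===== PORT B =====
def most_repeated_pattern_alt (sequence : List Int) (pattern_length : Int) : Option (List Int × Int) :=
  let windows : List (List Int) :=
    (PySem.List.pyRange 0 (PySem.List.len sequence - pattern_length + 1) 1).map
      (fun i => PySem.List.slice sequence (some i) (some (i + pattern_length)))
  -- 'for i, w in enumerate(windows)': iteration with a running index counter
  (windows.foldl
    (fun st w =>
      (st.1 + 1,
       -- Python's 'and' short-circuits: nested ifs
       if 3 ≤ PySem.Set.len (PySem.Set.ofList w) then
         if w ∉ PySem.List.slice windows none (some st.1) then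
           let c := PySem.List.count windows w
           match st.2 with
           | none => some (w, c)
           | some b => if c > b.2 then some (w, c) else st.2
         else st.2
       else st.2))
    ((0 : Int), none)).2

-- ===== PRECONDITION & SPEC =====
def Spec_most_repeated_pattern (sequence : List Int) (pattern_length : Int) (out : Option (List Int × Int)) : Prop := out = most_repeated_pattern_alt sequence pattern_length
instance (sequence : List Int) (pattern_length : Int) (out : Option (List Int × Int)) : Decidable (Spec_most_repeated_pattern sequence pattern_length out) := by unfold Spec_most_repeated_pattern; infer_instance

-- ===== CLAIM (what is proved, stated in full; the proofs are below) =====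
def Claim_equal_most_repeated_pattern : Prop := ∀ (sequence : List Int) (pattern_length : Int), Dom_most_repeated_pattern sequence pattern_length → Spec_most_repeated_pattern sequence pattern_length (most_repeated_pattern sequence pattern_length)

-- ===== LEMMAS AND PROOFS =====

-- first occurrences commute with filtering
theorem pv_ofList_filter {α : Type} [BEq α] [LawfulBEq α] (p : α → Bool) (xs : List α) :
    PySem.Set.ofList (xs.filter p) = (PySem.Set.ofList xs).filter p := by
  induction xs using List.reverseRecOn with
  | nil => rfl
  | append_singleton xs x ih =>
    rw [List.filter_append, PySem.Set.ofList_append_singleton, PySem.Set.add_eq_ite]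
    by_cases hp : p x = true
    · simp only [List.filter_cons, hp, if_pos, List.filter_nil]
      rw [PySem.Set.ofList_append_singleton, PySem.Set.add_eq_ite, ih]
      by_cases hm : x ∈ PySem.Set.ofList xs
      · rw [if_pos hm, if_pos (List.mem_filter.mpr ⟨hm, hp⟩)]
      · rw [if_neg hm, if_neg (fun h => hm (List.mem_filter.mp h).1), List.filter_append]
        simp [hp]
    · simp only [List.filter_cons, hp]
      simp only [Bool.false_eq_true, if_false, List.filter_nil, List.append_nil, ih]
      by_cases hm : x ∈ PySem.Set.ofList xs
      · rw [if_pos hm]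
      · rw [if_neg hm, List.filter_append]
        simp [hp]

-- head of an insertion step of the stable reverse sort
theorem pv_head_insertBy {α κ : Type} [LinearOrder κ] (key : α → κ) (x : α) (S : List α) :
    (PySem.List.insertBy (fun a b => decide (key b < key a)) x S).head? =
      match S.head? with
      | none => some x
      | some m => if key m < key x then some x else some m := by
  cases S with
  | nil => rfl
  | cons m t =>
    simp only [PySem.List.insertBy, List.head?_cons]
    by_cases h : key m < key x
    · simp [h]
    · simp [h]

-- head of Python's stable descending sort is the FIRST element with maximal key
theorem pv_head_sorted_rev {α κ : Type} [LinearOrder κ] (key : α → κ) (L : List α) :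
    (PySem.List.sorted L key true).head? = PySem.List.max? L key := by
  rw [PySem.List.sorted_rev_eq_foldl_insertBy]
  induction L using List.reverseRecOn with
  | nil => rfl
  | append_singleton xs x ih =>
    rw [List.foldl_append, List.foldl_cons, List.foldl_nil, pv_head_insertBy, ih]
    simp only [PySem.List.max?, List.foldl_append, List.foldl_cons, List.foldl_nil]
    cases hx : List.foldl
        (fun acc x =>
          match acc with
          | none => some x
          | some m => if key m < key x then some x else some m) none xs with
    | none => rfl
    | some m => rfl

-- the two item lists (A's filtered dict, counter of the filtered window list) coincide
theorem pv_items_eq (P : List (List Int)) :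
    ((PySem.Dict.counter P).items.foldl
        (fun d p => if 3 ≤ PySem.Set.len (PySem.Set.ofList p.1) then d.insert p.1 p.2 else d)
        PySem.Dict.empty).items =
      (PySem.Dict.counter
        (P.filter (fun w => decide (3 ≤ PySem.Set.len (PySem.Set.ofList w))))).items := by
  set q : List Int → Bool := fun w => decide (3 ≤ PySem.Set.len (PySem.Set.ofList w)) with hq
  have hfil : (List.filter (fun p : List Int × Int => decide (3 ≤ PySem.Set.len (PySem.Set.ofList p.1)))
      ((PySem.Set.ofList P).map (fun k => (k, (List.count k P : Int))))) =
      ((PySem.Set.ofList P).filter q).map (fun k => (k, (List.count k P : Int))) := by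
    rw [List.filter_map]; rfl
  rw [PySem.Dict.items_counter, PySem.Dict.items_counter, pv_ofList_filter]
  refine Eq.trans (congrArg PySem.Dict.items
    (PySem.List.foldl_ite_eq_foldl_filter
      (fun p : List Int × Int => 3 ≤ PySem.Set.len (PySem.Set.ofList p.1))
      (fun d (p : List Int × Int) => d.insert p.1 p.2) _ PySem.Dict.empty)) ?_
  rw [hfil]
  refine (PySem.Dict.items_foldl_insert_fresh _ (fun p : List Int × Int => p.1) (fun p : List Int × Int => p.2)
      PySem.Dict.empty ?_ ?_).trans ?_
  · intro a _; rfl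
  · have hcomp : ((fun p : List Int × Int => p.1) ∘ fun k => (k, (List.count k P : Int))) = id := by
      funext k; rfl
    rw [List.map_map, hcomp, List.map_id]
    exact (PySem.Set.nodup_ofList P).filter q
  · simp only [List.map_map]
    have : ((PySem.Dict.empty : PySem.Dict (List Int) Int)).items = [] := rfl
    rw [this, List.nil_append]
    apply List.map_congr_left
    intro k hk
    have hqk : q k = true := (List.mem_filter.mp hk).2
    simp only [Function.comp]
    rw [List.count_filter hqk]

-- head of take 1
theorem pv_head_take_one {α : Type} (l : List α) : (l.take 1).head? = l.head? := by
  cases l <;> rfl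

-- the index counter of B's loop counts the elements consumed
theorem pv_fold_fst {β : Type}
    (upd : (Int × Option β) → List Int → (Int × Option β))
    (hupd : ∀ st w, (upd st w).1 = st.1 + 1) :
    ∀ (xs : List (List Int)) (st : Int × Option β),
      (xs.foldl upd st).1 = st.1 + xs.length := by
  intro xs
  induction xs with
  | nil => intro st; simp
  | cons x t ih =>
    intro st
    rw [List.foldl_cons, ih, hupd]
    simp only [List.length_cons]
    push_cast
    ring

-- B's first-occurrence scan over windows (with its running index) is a fold over the
-- distinct qualifying windows in first-occurrence order
theorem pv_enum_fold {β : Type} (q : List Int → Prop) [DecidablePred q]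
    (g : Option β → List Int → Option β)
    (W : List (List Int)) :
    ∀ (xs : List (List Int)), xs <+: W → ∀ (b : Option β),
    (xs.foldl
      (fun st w =>
        (st.1 + 1,
         if q w then
           if w ∉ PySem.List.slice W none (some st.1) then g st.2 w else st.2
         else st.2))
      ((0 : Int), b)).2
    = (((PySem.Set.ofList xs).filter (fun w => decide (q w)))).foldl g b := by
  intro xs
  induction xs using List.reverseRecOn with
  | nil => intro _ b; rfl
  | append_singleton xs x ih =>
    intro hpre b
    have hpre' : xs <+: W := ((xs.prefix_append [x]).trans hpre)
    rw [List.foldl_append, List.foldl_cons, List.foldl_nil]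
    have hfst : (xs.foldl
        (fun st w =>
          (st.1 + 1,
           if q w then
             if w ∉ PySem.List.slice W none (some st.1) then g st.2 w else st.2
           else st.2))
        ((0 : Int), b)).1 = (xs.length : Int) := by
      rw [pv_fold_fst _ (fun st w => rfl)]
      simp
    change (if q x then
        if x ∉ PySem.List.slice W none
            (some ((xs.foldl
              (fun st w =>
                (st.1 + 1,
                 if q w then
                   if w ∉ PySem.List.slice W none (some st.1) then g st.2 w else st.2
                 else st.2))
              ((0 : Int), b)).1)) then
          g ((xs.foldl
              (fun st w =>
                (st.1 + 1,
                 if q w then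
                   if w ∉ PySem.List.slice W none (some st.1) then g st.2 w else st.2
                 else st.2))
              ((0 : Int), b)).2) x
        else ((xs.foldl
              (fun st w =>
                (st.1 + 1,
                 if q w then
                   if w ∉ PySem.List.slice W none (some st.1) then g st.2 w else st.2
                 else st.2))
              ((0 : Int), b)).2)
      else ((xs.foldl
              (fun st w =>
                (st.1 + 1,
                 if q w then
                   if w ∉ PySem.List.slice W none (some st.1) then g st.2 w else st.2
                 else st.2))
              ((0 : Int), b)).2)) = _
    rw [hfst, ih hpre']
    have hslice : PySem.List.slice W none (some (xs.length : Int)) = xs := by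
      rw [PySem.List.slice_to_natCast]
      exact (List.prefix_iff_eq_take.mp hpre').symm
    rw [hslice]
    rw [PySem.Set.ofList_append_singleton, PySem.Set.add_eq_ite]
    by_cases hq : q x
    · rw [if_pos hq]
      by_cases hm : x ∈ xs
      · rw [if_neg (by simp [hm]), if_pos ((PySem.Set.mem_ofList _ _).mpr hm)]
      · rw [if_pos hm, if_neg (fun h => hm ((PySem.Set.mem_ofList _ _).mp h))]
        rw [List.filter_append, List.foldl_append]
        simp [hq]
    · rw [if_neg hq]
      by_cases hm : x ∈ PySem.Set.ofList xs
      · rw [if_pos hm]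
      · rw [if_neg hm, List.filter_append]
        simp [hq]

-- the running-best scan is Python's max with a strict-improvement rule
theorem pv_max_eq (L : List (List Int × Int)) :
    PySem.List.max? L (fun p => p.2) =
      L.foldl
        (fun best p =>
          match best with
          | none => some p
          | some b => if p.2 > b.2 then some p else best)
        none := by
  unfold PySem.List.max?
  refine PySem.List.foldl_congr_mem _ _ _ _ ?_
  intro acc x _
  cases acc <;> rfl

theorem most_repeated_pattern_spec : Claim_equal_most_repeated_pattern := by
  intro sequence pattern_length _
  unfold Spec_most_repeated_pattern most_repeated_pattern most_repeated_pattern_alt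
  simp only []
  set W : List (List Int) :=
    (PySem.List.pyRange 0 (PySem.List.len sequence - pattern_length + 1) 1).map
      (fun i => PySem.List.slice sequence (some i) (some (i + pattern_length))) with hW
  rw [pv_head_take_one, pv_head_sorted_rev, pv_items_eq, PySem.Dict.items_counter,
      pv_ofList_filter]
  rw [pv_enum_fold (fun w => 3 ≤ PySem.Set.len (PySem.Set.ofList w))
      (fun best w =>
        match best with
        | none => some (w, (PySem.List.count W w : Int))
        | some b => if (PySem.List.count W w : Int) > b.2 then some (w, (PySem.List.count W w : Int)) else best)
      W W (List.prefix_refl W)]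
  -- both sides are now folds over the same filtered first-occurrence list
  set L : List (List Int) :=
    (PySem.Set.ofList W).filter (fun w => decide (3 ≤ PySem.Set.len (PySem.Set.ofList w))) with hL
  have hcount : ∀ k ∈ L,
      (List.count k (W.filter (fun w => decide (3 ≤ PySem.Set.len (PySem.Set.ofList w)))) : Int)
        = (PySem.List.count W k : Int) := by
    intro k hk
    have h1 := List.count_filter (p := fun w => decide (3 ≤ PySem.Set.len (PySem.Set.ofList w)))
      (l := W) (List.mem_filter.mp hk).2
    rw [h1, PySem.List.count_eq]
  rw [pv_max_eq, List.foldl_map]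
  exact PySem.List.foldl_congr_mem _ _ _ _ (fun acc k hk => by rw [hcount k hk])
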